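-- pv_equiv track=rewrite | github.com/DaylanDStoica/my_euler_projects | smallest_multiple.py | get_multipled_number
-- ===== SOURCE A (Python) =====
-- def get_factor_list (number):
--     # produce the factor list, return for adding to considered factors list
--     factor_list = []
--     for x in range(1,number+1):
--         if number % x == 0:
--             factor_list.append(x)
--     return factor_list
--
-- def get_multipled_number( top_number = 20):
--     factor_list = []
--     prod = 1
--     for x in range(top_number, 0 , -1):
--         if x in factor_list:
--             continue
--         else:
--             prod *= x
--         factor_list += get_factor_list(x)
--     return prod , factor_list
-- ===== SOURCE B (Python) =====
-- def get_multipled_number(top_number=20):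
--     # Closed-form insight: x ends up in the running factor list exactly when
--     # 2*x <= top_number, so only the upper half (top_number//2, top_number] is kept.
--     prod = 1
--     factor_list = []
--     for x in range(top_number, top_number // 2, -1):
--         prod *= x
--         factor_list.extend(d for d in range(1, x + 1) if x % d == 0)
--     return prod, factor_list
-- ===== Notes on version B (the rewrite author's own statement) =====
-- stated objective: faster
-- what changed: B replaces A's growing-list membership scan with the proved closed form that exactly the integers in (top_number//2, top_number] are kept: it iterates only the upper half multiplying each x and emitting its divisors, with no factor-list lookup at all.
import Mathlib
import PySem

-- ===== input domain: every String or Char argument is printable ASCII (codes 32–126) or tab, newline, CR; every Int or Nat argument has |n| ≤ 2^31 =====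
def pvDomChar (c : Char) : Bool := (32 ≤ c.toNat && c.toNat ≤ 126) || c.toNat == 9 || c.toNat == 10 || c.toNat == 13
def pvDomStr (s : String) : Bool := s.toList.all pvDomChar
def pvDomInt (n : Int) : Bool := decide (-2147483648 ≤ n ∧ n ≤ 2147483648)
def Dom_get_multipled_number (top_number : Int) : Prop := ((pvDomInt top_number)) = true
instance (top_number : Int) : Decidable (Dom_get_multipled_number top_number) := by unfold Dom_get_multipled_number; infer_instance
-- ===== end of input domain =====

-- B replaces A's growing-list membership scan with the proved closed form that exactly
-- the integers in (top_number//2, top_number] escape the skip test; objective: faster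
-- (a timing run measures the constant-factor gain).

-- ===== PORT A =====
def get_factor_list (number : Int) : List Int :=
  (PySem.List.pyRange 1 (number + 1) 1).foldl
    (fun acc x => if PySem.Int.mod number x == 0 then acc ++ [x] else acc) []

def get_multipled_number (top_number : Int) : Int × List Int :=
  let st := (PySem.List.pyRange top_number 0 (-1)).foldl
    (fun (st : List Int × Int) x =>
      if x ∈ st.1 then st
      else (st.1 ++ get_factor_list x, st.2 * x))
    ([], 1)
  (st.2, st.1)

-- ===== PORT B =====
def get_multipled_number_alt (top_number : Int) : Int × List Int :=
  (PySem.List.pyRange top_number (PySem.Int.floordiv top_number 2) (-1)).foldl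
    (fun (st : Int × List Int) x =>
      (st.1 * x,
       st.2 ++ (PySem.List.pyRange 1 (x + 1) 1).filter (fun d => PySem.Int.mod x d == 0)))
    (1, [])

-- ===== PRECONDITION & SPEC =====
def Spec_get_multipled_number (top_number : Int) (out : Int × List Int) : Prop := out = get_multipled_number_alt top_number
instance (top_number : Int) (out : Int × List Int) : Decidable (Spec_get_multipled_number top_number out) := by unfold Spec_get_multipled_number; infer_instance

-- ===== CLAIM (what is proved, stated in full; the proofs are below) =====
def Claim_equal_get_multipled_number : Prop := ∀ (top_number : Int), Dom_get_multipled_number top_number → Spec_get_multipled_number top_number (get_multipled_number top_number)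

-- ===== LEMMAS AND PROOFS =====

-- A's loop body, abbreviated
def pvBodyA (st : List Int × Int) (x : Int) : List Int × Int :=
  if x ∈ st.1 then st else (st.1 ++ get_factor_list x, st.2 * x)

-- get_factor_list is the ascending list of divisors
lemma pv_factor_list_eq (y : Int) :
    get_factor_list y
      = (PySem.List.pyRange 1 (y + 1) 1).filter (fun d => PySem.Int.mod y d == 0) := by
  unfold get_factor_list
  exact PySem.List.foldl_append_if_eq_filter _ _ _

lemma pv_mem_factor_list {x y : Int} :
    x ∈ get_factor_list y ↔ (1 ≤ x ∧ x ≤ y ∧ x ∣ y) := by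
  rw [pv_factor_list_eq, List.mem_filter, PySem.List.mem_pyRange_one]
  simp only [beq_iff_eq, PySem.Int.mod_eq_zero_iff_dvd]
  constructor
  · rintro ⟨⟨h1, h2⟩, h3⟩; exact ⟨h1, by omega, h3⟩
  · rintro ⟨h1, h2, h3⟩; exact ⟨⟨h1, by omega⟩, h3⟩

-- B's loop over any list, unfolded into product and flatMap
lemma pv_foldB (l : List Int) (p : Int) (L : List Int) :
    l.foldl (fun (st : Int × List Int) x =>
        (st.1 * x,
         st.2 ++ (PySem.List.pyRange 1 (x + 1) 1).filter (fun d => PySem.Int.mod x d == 0)))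
      (p, L)
      = (l.foldl (· * ·) p, L ++ l.flatMap get_factor_list) := by
  induction l generalizing p L with
  | nil => simp
  | cons y l ih =>
      simp only [List.foldl_cons, ih, List.flatMap_cons, pv_factor_list_eq, List.append_assoc]

-- countdown snoc: range(a,b,-1) = range(a,b+1,-1) ++ [b+1]
lemma pv_pyRange_neg_one_snoc {a b : Int} (h : b < a) :
    PySem.List.pyRange a b (-1) = PySem.List.pyRange a (b + 1) (-1) ++ [b + 1] := by
  rw [PySem.List.pyRange_neg_one_eq_reverse, PySem.List.pyRange_neg_one_eq_reverse,
    PySem.List.pyRange_one_cons (by omega : b + 1 < a + 1)]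
  simp

-- Phase 1: over the upper half A never finds x in its factor list
lemma pv_phase1 (n : Int) (hn : 1 ≤ n) :
    ∀ (k : Nat), (k : Int) ≤ n - PySem.Int.floordiv n 2 →
      (PySem.List.pyRange n (n - k) (-1)).foldl pvBodyA ([], 1)
        = ((PySem.List.pyRange n (n - k) (-1)).flatMap get_factor_list,
           (PySem.List.pyRange n (n - k) (-1)).foldl (· * ·) 1) := by
  have hfd : PySem.Int.floordiv n 2 * 2 + PySem.Int.mod n 2 = n := PySem.Int.floordiv_mul_add_mod n 2
  have hm : 0 ≤ PySem.Int.mod n 2 ∧ PySem.Int.mod n 2 < 2 := by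
    constructor
    · exact PySem.Int.mod_nonneg n (by omega)
    · exact PySem.Int.mod_lt n (by omega)
  intro k
  induction k with
  | zero =>
      intro _
      rw [PySem.List.pyRange_neg_one_eq_nil (by omega)]
      simp
  | succ k ih =>
      intro hk
      push_cast at hk ⊢
      have hrange : PySem.List.pyRange n (n - (k + 1)) (-1)
          = PySem.List.pyRange n (n - k) (-1) ++ [n - k] := by
        have := pv_pyRange_neg_one_snoc (a := n) (b := n - (k + 1)) (by omega)
        simpa [show n - (k + 1) + 1 = n - k by ring] using this
      have ihk := ih (by omega)
      rw [hrange, List.foldl_append, ihk]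
      have hnotmem : (n - k) ∉ (PySem.List.pyRange n (n - k) (-1)).flatMap get_factor_list := by
        intro hmem
        rcases List.mem_flatMap.1 hmem with ⟨y, hy, hxy⟩
        rw [PySem.List.mem_pyRange_neg_one] at hy
        rcases pv_mem_factor_list.1 hxy with ⟨h1, h2, t, ht⟩
        -- y is a proper multiple of n - k, so y ≥ 2(n-k) > n: contradiction
        have h2t : 2 ≤ t := by nlinarith [hy.1, hy.2, h1]
        nlinarith [hy.2, hk]
      simp only [List.foldl_cons, List.foldl_nil, pvBodyA, if_neg hnotmem]
      simp

-- Phase 2: every x in 1..m is already in L, so A's fold over range(m,0,-1) is a no-op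
lemma pv_phase2 (L : List Int) (p : Int) :
    ∀ (m : Nat), (∀ x : Int, 1 ≤ x → x ≤ (m : Int) → x ∈ L) →
      (PySem.List.pyRange (m : Int) 0 (-1)).foldl pvBodyA (L, p) = (L, p) := by
  intro m
  induction m with
  | zero =>
      intro _
      rw [PySem.List.pyRange_neg_one_eq_nil (by omega)]
      simp
  | succ m ih =>
      intro hmem
      rw [PySem.List.pyRange_neg_one_cons (by push_cast; omega)]
      have hx : ((m : Int) + 1) ∈ L := hmem _ (by omega) (by push_cast; omega)
      push_cast
      simp only [List.foldl_cons, pvBodyA, if_pos hx,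
        show (m : Int) + 1 - 1 = (m : Int) by ring]
      exact ih (fun x h1 h2 => hmem x h1 (by omega))

-- every x in the lower half divides some kept y in the upper half
lemma pv_lower_mem (n : Int) (_hn : 1 ≤ n) (x : Int) (h1 : 1 ≤ x)
    (h2 : x ≤ PySem.Int.floordiv n 2) :
    x ∈ (PySem.List.pyRange n (PySem.Int.floordiv n 2) (-1)).flatMap get_factor_list := by
  have hfd : PySem.Int.floordiv n 2 * 2 + PySem.Int.mod n 2 = n := PySem.Int.floordiv_mul_add_mod n 2
  have hm : 0 ≤ PySem.Int.mod n 2 ∧ PySem.Int.mod n 2 < 2 := by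
    exact ⟨PySem.Int.mod_nonneg n (by omega), PySem.Int.mod_lt n (by omega)⟩
  -- take y = x * (n // x), the largest multiple of x not exceeding n
  have hfx : PySem.Int.floordiv n x * x + PySem.Int.mod n x = n := PySem.Int.floordiv_mul_add_mod n x
  have hmx : 0 ≤ PySem.Int.mod n x ∧ PySem.Int.mod n x < x := by
    exact ⟨PySem.Int.mod_nonneg n (by omega), PySem.Int.mod_lt n (by omega)⟩
  set q := PySem.Int.floordiv n x with hq
  have hq2 : 2 ≤ q := by nlinarith
  refine List.mem_flatMap.2 ⟨q * x, ?_, ?_⟩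
  · rw [PySem.List.mem_pyRange_neg_one]
    constructor
    · nlinarith
    · omega
  · exact pv_mem_factor_list.2 ⟨h1, by nlinarith, ⟨q, by ring⟩⟩

-- ===== VERDICT (by name: the statement is the Claim_ definition above) =====
theorem get_multipled_number_spec : Claim_equal_get_multipled_number := by
  intro n _
  unfold Spec_get_multipled_number get_multipled_number get_multipled_number_alt
  by_cases hn : n ≤ 0
  · have hfd : PySem.Int.floordiv n 2 * 2 + PySem.Int.mod n 2 = n := PySem.Int.floordiv_mul_add_mod n 2
    have hm : 0 ≤ PySem.Int.mod n 2 ∧ PySem.Int.mod n 2 < 2 := by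
      exact ⟨PySem.Int.mod_nonneg n (by omega), PySem.Int.mod_lt n (by omega)⟩
    rw [PySem.List.pyRange_neg_one_eq_nil (by omega : n ≤ 0),
      PySem.List.pyRange_neg_one_eq_nil (by omega : n ≤ PySem.Int.floordiv n 2)]
    simp
  · rw [not_le] at hn
    have hfd : PySem.Int.floordiv n 2 * 2 + PySem.Int.mod n 2 = n := PySem.Int.floordiv_mul_add_mod n 2
    have hm : 0 ≤ PySem.Int.mod n 2 ∧ PySem.Int.mod n 2 < 2 := by
      exact ⟨PySem.Int.mod_nonneg n (by omega), PySem.Int.mod_lt n (by omega)⟩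
    set h := PySem.Int.floordiv n 2 with hh
    have hh0 : 0 ≤ h := by omega
    have hhn : h ≤ n := by omega
    -- split A's countdown at h
    have hsplit : PySem.List.pyRange n 0 (-1)
        = PySem.List.pyRange n h (-1) ++ PySem.List.pyRange h 0 (-1) := by
      rw [PySem.List.pyRange_neg_one_eq_reverse, PySem.List.pyRange_neg_one_eq_reverse,
        PySem.List.pyRange_neg_one_eq_reverse,
        show (0:Int) + 1 = 1 from by ring,
        PySem.List.pyRange_one_append 1 (h + 1) (n + 1) (by omega) (by omega)]
      simp
    have hkey : (PySem.List.pyRange n h (-1)).foldl pvBodyA ([], 1)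
        = ((PySem.List.pyRange n h (-1)).flatMap get_factor_list,
           (PySem.List.pyRange n h (-1)).foldl (· * ·) 1) := by
      have := pv_phase1 n (by omega) (n - h).toNat (by omega)
      rw [show ((n - h).toNat : Int) = n - h by omega] at this
      simpa using this
    have hbodyA : (fun (st : List Int × Int) x =>
        if x ∈ st.1 then st else (st.1 ++ get_factor_list x, st.2 * x)) = pvBodyA := rfl
    rw [hsplit, List.foldl_append, hbodyA, hkey]
    have hphase2 := pv_phase2 ((PySem.List.pyRange n h (-1)).flatMap get_factor_list)
      ((PySem.List.pyRange n h (-1)).foldl (· * ·) 1) h.toNat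
      (fun x h1 h2 => pv_lower_mem n hn x h1 (by omega))
    rw [show ((h.toNat : Int)) = h by omega] at hphase2
    rw [hphase2, pv_foldB]
    simp
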